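-- pv_equiv track=rewrite | github.com/preethamdheeraj/Hackerrank_Solutions | HackerRankPythonsolutions/22Alphabet Rangoli.py | rangoli
-- ===== SOURCE A (Python) =====
-- def rangoli(begin, size):
--     ascii_lowercase = "abcdefghijklmnopqrstuvwxyz"
--
--     lin1 = ""
--     lin2 = ""
--
--     for i in range(begin, size):
--         l = ascii_lowercase[i]
--         lin2 += l + " "
--
--     lin1 = lin2[:0:-1]
--     lin = lin1 + lin2
--     lin = lin.strip()
--     lin = lin.replace(" ", "-")
--     return lin
-- ===== SOURCE B (Python) =====
-- def rangoli(begin, size):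
--     ascii_lowercase = "abcdefghijklmnopqrstuvwxyz"
--     if size <= begin:
--         return ""
--
--     def wing(i):
--         if i == begin:
--             return ascii_lowercase[i]
--         return ascii_lowercase[i] + "-" + wing(i - 1) + "-" + ascii_lowercase[i]
--
--     return wing(size - 1)
-- ===== Notes on version B (the rewrite author's own statement) =====
-- stated objective: alternative
-- what changed: B replaces A's space-separated string accumulation + reverse slice lin2[:0:-1] + strip() + space-to-dash replace with a recursive wing(i) that builds the dashed palindrome directly, wrapping the smaller palindrome in letter(i) and dashes on both sides.
-- outside the precondition, e.g. on rangoli(0, 27): A raises IndexError, B raises IndexError; on rangoli(-30, 0): A raises IndexError, B raises IndexError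
import Mathlib
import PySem

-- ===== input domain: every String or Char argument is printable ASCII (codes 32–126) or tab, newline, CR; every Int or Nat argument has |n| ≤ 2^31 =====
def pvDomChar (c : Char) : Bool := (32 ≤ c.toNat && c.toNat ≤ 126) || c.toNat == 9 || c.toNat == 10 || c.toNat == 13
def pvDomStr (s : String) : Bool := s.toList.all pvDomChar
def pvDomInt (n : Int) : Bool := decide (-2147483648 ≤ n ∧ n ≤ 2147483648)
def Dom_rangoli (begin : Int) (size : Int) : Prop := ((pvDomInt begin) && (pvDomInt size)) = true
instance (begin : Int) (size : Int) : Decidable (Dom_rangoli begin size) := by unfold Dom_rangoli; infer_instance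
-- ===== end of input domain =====

-- B builds the dashed mirrored line by a recursion that wraps the previous palindrome in the next
-- letter on both sides, instead of A's space-separated accumulation, reverse slice, strip() and
-- space-to-dash replace (objective: alternative decomposition).

def pvAlpha : List Char := "abcdefghijklmnopqrstuvwxyz".toList

def pvLetter (i : Int) : Char := PySem.List.pyGetD pvAlpha i ' '  -- ascii_lowercase[i]; Pre_ keeps the index in range

-- ===== PORT A =====
def rangoli (begin : Int) (size : Int) : String :=
  let lin2 : List Char :=
    (PySem.List.pyRange begin size 1).foldl
      (fun acc i => acc ++ [pvLetter i, ' ']) []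
  let lin1 : List Char := (PySem.List.slice? lin2 none (some 0) (-1)).getD []  -- lin2[:0:-1]
  let lin : List Char := lin1 ++ lin2
  String.ofList (PySem.Chars.replace (PySem.Chars.strip lin) [' '] ['-'])

-- ===== PORT B =====
-- wing(i) of Source B, recursing on the count k = i - begin (the Python recursion decreases i toward begin)
def rangoliWing (begin : Int) : Nat → List Char
  | 0 => [pvLetter begin]
  | k + 1 =>
      pvLetter (begin + (k + 1)) :: '-' ::
        (rangoliWing begin k ++ ['-', pvLetter (begin + (k + 1))])

def rangoli_alt (begin : Int) (size : Int) : String :=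
  if size ≤ begin then ""
  else String.ofList (rangoliWing begin (size - 1 - begin).toNat)

-- ===== PRECONDITION & SPEC =====
-- Pre_ excludes exactly the inputs where A raises IndexError: some i in range(begin, size)
-- has ascii_lowercase[i] out of range (i < -26 or i ≥ 26).
def Pre_rangoli (begin : Int) (size : Int) : Prop :=
  size ≤ begin ∨ (-26 ≤ begin ∧ size ≤ 26)
instance (begin : Int) (size : Int) : Decidable (Pre_rangoli begin size) := by
  unfold Pre_rangoli; infer_instance
def pvWitness_rangoli : Int × Int := (0, 4)

def Spec_rangoli (begin : Int) (size : Int) (out : String) : Prop := out = rangoli_alt begin size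
instance (begin : Int) (size : Int) (out : String) : Decidable (Spec_rangoli begin size out) := by
  unfold Spec_rangoli; infer_instance

-- ===== CLAIM (what is proved, stated in full; the proofs are below) =====
def Claim_equal_rangoli : Prop := ∀ (begin : Int) (size : Int), Dom_rangoli begin size → Pre_rangoli begin size → Spec_rangoli begin size (rangoli begin size)

-- ===== LEMMAS AND PROOFS =====

theorem pv_key {α : Type} (u : List α) : ∀ (a : α),
    List.filterMap (fun (x : Nat) => (a::u)[((u.length : Int) - x).toNat]?) (List.range u.length) = u.reverse := by
  induction u with
  | nil => intro a; simp
  | cons c v ih =>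
    intro a
    rw [show (c::v).length = v.length + 1 from rfl, List.range_succ, List.filterMap_append]
    have h1 : List.filterMap (fun (x : Nat) => (a::c::v)[(((v.length + 1 : Nat) : Int) - x).toNat]?) (List.range v.length)
        = List.filterMap (fun (x : Nat) => (c::v)[((v.length : Int) - x).toNat]?) (List.range v.length) := by
      apply List.filterMap_congr
      intro x hx
      have hx' : x < v.length := List.mem_range.mp hx
      have h2 : (((v.length + 1 : Nat) : Int) - x).toNat = ((v.length : Int) - x).toNat + 1 := by omega
      rw [h2, List.getElem?_cons_succ]
    rw [h1, ih c]
    simp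

theorem pv_slice_stop_zero_neg_one {α : Type} (xs : List α) :
    PySem.List.slice? xs none (some 0) (-1) = some xs.tail.reverse := by
  simp only [PySem.List.slice?, PySem.List.sliceIndices]
  norm_num
  cases xs with
  | nil => simp
  | cons a t =>
    cases t with
    | nil => simp
    | cons b u =>
      have hif : (1 : Nat) < (a::b::u).length := by simp
      rw [if_pos hif]
      have hcount : ((((a::b::u).length : Int) - 1 - min 0 (((a::b::u).length : Int) - 1)).toNat) = (b::u).length := by
        simp only [List.length_cons]; omega
      rw [hcount]
      simp only [List.tail_cons]
      calc List.filterMap (fun (x : Nat) => (a::b::u)[(((a::b::u).length : Int) - 1 + -(x:Int)).toNat]?) (List.range (b::u).length)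
          = List.filterMap (fun (x : Nat) => (a::b::u)[(((b::u).length : Int) - x).toNat]?) (List.range (b::u).length) := by
            apply List.filterMap_congr
            intro x hx
            congr 1
            simp only [List.length_cons]
            omega
        _ = (b::u).reverse := pv_key (b::u) a

theorem pv_replace_space (s : List Char) :
    PySem.Chars.replace s [' '] ['-'] = s.map (fun c => if c = ' ' then '-' else c) := by
  have go_spec : ∀ (l : List Char) (fuel : Nat) (acc : List Char), l.length ≤ fuel →
      PySem.Chars.replace.go [' '] ['-'] fuel l acc = acc.reverse ++ l.map (fun c => if c = ' ' then '-' else c) := by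
    intro l
    induction l with
    | nil => intro fuel acc _; cases fuel <;> simp [PySem.Chars.replace.go]
    | cons c t ih =>
      intro fuel acc hlen
      cases fuel with
      | zero => simp at hlen
      | succ f =>
        rw [PySem.Chars.replace.go]
        by_cases hc : c = ' '
        · subst hc
          have hpre : List.isPrefixOf [' '] (' ' :: t) = true := by simp [List.isPrefixOf]
          simp only [hpre, if_pos, List.length_cons, List.length_nil, List.drop_succ_cons, List.drop_zero]
          rw [ih f _ (by simpa using hlen)]
          simp
        · have hpre : List.isPrefixOf [' '] (c :: t) = false := by
            simp [List.isPrefixOf]; exact fun h => absurd h.symm hc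
          rw [if_neg (by simp [hpre])]
          rw [ih f _ (by simpa using hlen)]
          simp [hc]
  unfold PySem.Chars.replace
  rw [if_neg (by simp)]
  exact go_spec s s.length [] le_rfl

theorem pv_intersperse_append {α : Type} (s : α) (xs ys : List α) (hx : xs ≠ []) (hy : ys ≠ []) :
    (xs ++ ys).intersperse s = xs.intersperse s ++ s :: ys.intersperse s := by
  induction xs with
  | nil => exact absurd rfl hx
  | cons c t ih =>
    cases t with
    | nil =>
      cases ys with
      | nil => exact absurd rfl hy
      | cons d u => simp [List.intersperse]
    | cons d u =>
      have := ih (by simp)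
      simp only [List.cons_append] at *
      rw [show (c::d::(u++ys)).intersperse s = c :: s :: (d::(u++ys)).intersperse s from by simp [List.intersperse],
          show (c::d::u).intersperse s = c :: s :: (d::u).intersperse s from by simp [List.intersperse]]
      simp [this]

theorem pv_inter_head {α : Type} (s a : α) (rest : List α) (h : rest ≠ []) :
    (a :: rest).intersperse s = a :: s :: rest.intersperse s := by
  cases rest with
  | nil => exact absurd rfl h
  | cons d u => simp [List.intersperse]

theorem pv_reverse_intersperse {α : Type} (s : α) (xs : List α) :
    (xs.intersperse s).reverse = xs.reverse.intersperse s := by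
  induction xs with
  | nil => rfl
  | cons c t ih =>
    cases t with
    | nil => rfl
    | cons d u =>
      rw [show (c::d::u).intersperse s = c :: s :: (d::u).intersperse s from by simp [List.intersperse]]
      have h2 : (c::d::u).reverse = (d::u).reverse ++ [c] := by simp
      rw [h2, pv_intersperse_append s _ [c] (by simp) (by simp)]
      simp [ih]

theorem pv_map_intersperse {α β : Type} (f : α → β) (s : α) (xs : List α) :
    (xs.intersperse s).map f = (xs.map f).intersperse (f s) := by
  induction xs with
  | nil => rfl
  | cons c t ih =>
    cases t with
    | nil => rfl
    | cons d u =>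
      rw [show (c::d::u).intersperse s = c :: s :: (d::u).intersperse s from by simp [List.intersperse]]
      simp only [List.map_cons]
      rw [show ((f c)::(f d)::(u.map f)).intersperse (f s) = f c :: f s :: ((f d)::(u.map f)).intersperse (f s) from by simp [List.intersperse]]
      simp [ih]

theorem pv_flat_eq (L : List Char) (h : L ≠ []) :
    L.flatMap (fun c => [c, ' ']) = L.intersperse ' ' ++ [' '] := by
  induction L with
  | nil => exact absurd rfl h
  | cons c t ih =>
    cases t with
    | nil => rfl
    | cons d u =>
      rw [show (c::d::u).intersperse ' ' = c :: ' ' :: (d::u).intersperse ' ' from by simp [List.intersperse]]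
      rw [List.flatMap_cons, ih (by simp)]
      simp

theorem pv_space_isspace : PySem.Chars.isspace ' ' = true := by decide

theorem pv_inter_head_ex (s e : Char) (es : List Char) :
    ∃ t, (e::es).intersperse s = e :: t := by
  cases es with
  | nil => exact ⟨[], by simp⟩
  | cons f fs => exact ⟨s :: (f::fs).intersperse s, by simp [List.intersperse]⟩

theorem pv_dropWhile_inter (Rr : List Char) (hRr : Rr ≠ [])
    (hns : ∀ x ∈ Rr, PySem.Chars.isspace x = false) (rest : List Char) :
    List.dropWhile PySem.Chars.isspace (Rr.intersperse ' ' ++ rest)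
      = Rr.intersperse ' ' ++ rest := by
  obtain ⟨e, es, rfl⟩ : ∃ e es, Rr = e :: es := by
    cases Rr with
    | nil => exact absurd rfl hRr
    | cons e es => exact ⟨e, es, rfl⟩
  obtain ⟨t, ht⟩ := pv_inter_head_ex ' ' e es
  rw [ht, List.cons_append, List.dropWhile_cons]
  simp [hns e (by simp)]

-- A's strip/replace pipeline computed in closed form: the dash-interspersed palindrome
theorem pv_main (L : List Char) (h : ∀ x ∈ L, PySem.Chars.isspace x = false) :
    PySem.Chars.replace
        (PySem.Chars.strip ((L.flatMap (fun c => [c, ' '])).tail.reverse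
          ++ L.flatMap (fun c => [c, ' ']))) [' '] ['-']
      = List.intersperse '-' (L.reverse ++ L.tail) := by
  cases L with
  | nil => rfl
  | cons c R =>
    have hc : PySem.Chars.isspace c = false := h c (by simp)
    have hcne : c ≠ ' ' := by intro e; rw [e] at hc; simp [pv_space_isspace] at hc
    cases R with
    | nil =>
      simp [PySem.Chars.strip, PySem.Chars.lstrip, PySem.Chars.rstrip,
            pv_space_isspace, hc, pv_replace_space, hcne]
    | cons d R' =>
      have hRne : (d :: R') ≠ [] := by simp
      have hns : ∀ x ∈ (d :: R'), PySem.Chars.isspace x = false := by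
        intro x hx; exact h x (by simp [hx])
      have hnsrev : ∀ x ∈ (d :: R').reverse, PySem.Chars.isspace x = false := by
        intro x hx; exact hns x (List.mem_reverse.mp hx)
      have hX : ((d :: R').flatMap fun c => [c,' ']) = (d :: R').intersperse ' ' ++ [' '] :=
        pv_flat_eq _ hRne
      rw [List.flatMap_cons, hX]
      have hlin : (([c,' '] ++ (List.intersperse ' ' (d::R') ++ [' '])).tail.reverse
            ++ ([c,' '] ++ (List.intersperse ' ' (d::R') ++ [' '])))
          = ' ' :: ((List.intersperse ' ' (d::R')).reverse
              ++ (' ' :: c :: ' ' :: (List.intersperse ' ' (d::R') ++ [' ']))) := by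
        simp
      rw [hlin]
      unfold PySem.Chars.strip PySem.Chars.lstrip PySem.Chars.rstrip
      rw [List.dropWhile_cons]
      rw [if_pos (by simp [pv_space_isspace])]
      rw [pv_reverse_intersperse]
      rw [pv_dropWhile_inter _ (by simp) hnsrev]
      have h2 : ((List.intersperse ' ' (d::R').reverse) ++
            ' ' :: c :: ' ' :: (List.intersperse ' ' (d::R') ++ [' '])).reverse
          = ' ' :: ((List.intersperse ' ' (d::R').reverse)
              ++ (' ' :: c :: ' ' :: List.intersperse ' ' (d::R'))) := by
        simp [pv_reverse_intersperse]
      rw [h2, List.dropWhile_cons, if_pos (by simp [pv_space_isspace])]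
      rw [pv_dropWhile_inter _ (by simp) hnsrev]
      have h3 : ((List.intersperse ' ' (d::R').reverse)
            ++ (' ' :: c :: ' ' :: List.intersperse ' ' (d::R'))).reverse
          = (List.intersperse ' ' (d::R').reverse)
              ++ (' ' :: c :: ' ' :: List.intersperse ' ' (d::R')) := by
        simp [pv_reverse_intersperse]
      rw [h3]
      have hS : (List.intersperse ' ' (d::R').reverse)
            ++ (' ' :: c :: ' ' :: List.intersperse ' ' (d::R'))
          = List.intersperse ' ' ((d::R').reverse ++ c :: d :: R') := by
        rw [pv_intersperse_append ' ' _ _ (by simp) (by simp)]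
        simp [List.intersperse]
      rw [hS, pv_replace_space, pv_map_intersperse]
      have hmap : ((d::R').reverse ++ c :: d :: R').map (fun x => if x = ' ' then '-' else x)
          = ((d::R').reverse ++ c :: d :: R').map id := by
        apply List.map_congr_left
        intro x hx
        have hxs : PySem.Chars.isspace x = false := by
          rcases List.mem_append.mp hx with hx | hx
          · exact hnsrev x hx
          · exact h x (by simpa using hx)
        have : x ≠ ' ' := by intro e; rw [e] at hxs; simp [pv_space_isspace] at hxs
        simp [this]
      rw [hmap, List.map_id]
      simp

-- B's wing recursion computed in closed form: the same dash-interspersed palindrome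
theorem pv_wing (b : Int) : ∀ (k : Nat),
    rangoliWing b k =
      List.intersperse '-'
        (((List.range (k+1)).map (fun j : Nat => pvLetter (b + (j:Int)))).reverse
          ++ ((List.range (k+1)).map (fun j : Nat => pvLetter (b + (j:Int)))).tail) := by
  intro k
  induction k with
  | zero => simp [rangoliWing]
  | succ k ih =>
    set f : Nat → Char := fun j : Nat => pvLetter (b + (j:Int)) with hf
    have hM : (List.range (k+1+1)).map f = (List.range (k+1)).map f ++ [f (k+1)] := by
      simp [List.range_succ]
    obtain ⟨c, t, hct⟩ : ∃ c t, (List.range (k+1)).map f = c :: t := by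
      rw [List.range_succ_eq_map, List.map_cons]; exact ⟨f 0, _, rfl⟩
    rw [hM, hct]
    have htail : ((c :: t ++ [f (k+1)]) : List Char).tail = t ++ [f (k+1)] := by simp
    have hrev : ((c :: t ++ [f (k+1)]) : List Char).reverse = f (k+1) :: (c :: t).reverse := by simp
    rw [htail, hrev]
    have hgroup : (f (k+1) :: (c :: t).reverse) ++ (t ++ [f (k+1)])
        = (f (k+1) :: ((c :: t).reverse ++ t)) ++ [f (k+1)] := by simp
    rw [hgroup,
        pv_intersperse_append '-' _ [f (k+1)] (by simp) (by simp),
        pv_inter_head '-' (f (k+1)) _ (by simp)]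
    rw [rangoliWing]
    have hl : pvLetter (b + ((k : Int) + 1)) = f (k+1) := by
      rw [hf]; push_cast; ring_nf
    rw [hl]
    rw [hct] at ih
    rw [show ((c :: t) : List Char).tail = t from rfl] at ih
    rw [ih]
    simp [List.intersperse]

set_option maxRecDepth 10000 in
theorem pv_alpha_nospace : pvAlpha.all (fun c => !PySem.Chars.isspace c) = true := by decide

-- ===== VERDICT (by name: the statement is the Claim_ definition above) =====
theorem rangoli_spec : Claim_equal_rangoli := by
  intro b s _ hpre
  unfold Spec_rangoli rangoli
  simp only [PySem.List.foldl_append_eq_flatMap, List.nil_append]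
  rw [pv_slice_stop_zero_neg_one]
  simp only [Option.getD_some]
  set L : List Char := (PySem.List.pyRange b s 1).map (fun i => pvLetter i) with hLdef
  have h1 : (PySem.List.pyRange b s 1).flatMap (fun i => [pvLetter i, ' '])
      = L.flatMap (fun c => [c, ' ']) := by
    rw [hLdef, List.flatMap_map]
  rw [h1]
  have hmain := pv_main L ?nospace
  case nospace =>
    intro x hx
    rw [hLdef] at hx
    obtain ⟨i, hi, rfl⟩ := List.mem_map.mp hx
    have hrange := (PySem.List.mem_pyRange_one).mp hi
    have hlen : pvAlpha.length = 26 := by decide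
    have hinr : PySem.Raise.InRange pvAlpha.length i := by
      unfold PySem.Raise.InRange
      rw [hlen]
      rcases hpre with h | h
      · omega
      · constructor <;> omega
    obtain ⟨x, hxeq⟩ : ∃ x, PySem.List.pyGet? pvAlpha i = some x := by
      rcases hopt : PySem.List.pyGet? pvAlpha i with _ | x
      · exact absurd hinr ((PySem.List.pyGet?_eq_none_iff pvAlpha i).mp hopt)
      · exact ⟨x, rfl⟩
    have hxmem : x ∈ pvAlpha := PySem.List.mem_of_pyGet?_eq_some pvAlpha hxeq
    have : pvLetter i = x := by
      simp [pvLetter, PySem.List.pyGetD, hxeq]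
    rw [this]
    have := List.all_eq_true.mp pv_alpha_nospace x hxmem
    simpa using this
  rw [hmain]
  unfold rangoli_alt
  by_cases hbs : s ≤ b
  · rw [if_pos hbs]
    rw [hLdef, PySem.List.pyRange_one_eq_nil hbs]
    rfl
  · rw [if_neg hbs]
    have hb : b < s := by omega
    have hk : (s - 1 - b).toNat + 1 = (s - b).toNat := by omega
    rw [pv_wing b, hk]
    have hL : L = (List.range (s - b).toNat).map (fun j : Nat => pvLetter (b + (j:Int))) := by
      rw [hLdef, PySem.List.pyRange_one, List.map_map]
      rfl
    rw [hL]

-- claim.json cites: A raises IndexError outside Pre_ (e.g. (0, 27)), never returns there.
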